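-- pv_equiv track=rewrite | github.com/Qiselong/ORCO21 | GDS/G_tilde.py | G_tilde
-- ===== SOURCE A (Python) =====
-- def in_tuple(t1, t2):
--     """
--     decides in tuple t1 is a subtuple of t2.
--     """
--     a, b = t1[0], t1[1]
--     c, d, e = t2[0], t2[1], t2[2]
--     return ( a==c and ( b==d or b==e ) ) or ( a==d and b==e ) #every shit is sorted so i can do that
--
-- def G_tilde(triangles, edges):
--     """
--     print into file_loc the data of G_tilde.
--     """
--     nE = len(edges)
--     n_tilde = len(triangles) + nE
--     G_tilde = [ [0 for i in range(n_tilde)] for j in range(n_tilde) ]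
--
--     for i_edge in range(len(edges)):
--         for i_triangle in range(len(triangles)):
--             e_i, t_i = edges[i_edge], triangles[i_triangle]
--             if in_tuple(e_i, t_i):
--                 G_tilde[i_edge][i_triangle + nE] = 1
--                 G_tilde[i_triangle + nE][i_edge] = 1
--     return G_tilde
-- ===== SOURCE B (Python) =====
-- def G_tilde(triangles, edges):
--     """
--     print into file_loc the data of G_tilde.
--     """
--     nE = len(edges)
--     n_tilde = len(triangles) + nE
--     G = [[0] * n_tilde for _ in range(n_tilde)]
--
--     # index each edge key once; a key maps to the LIST of indices of equal edges
--     index_of = {}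
--     for i in range(nE):
--         index_of.setdefault((edges[i][0], edges[i][1]), []).append(i)
--
--     # drive the fill from the triangles: generate each triangle's three
--     # sub-edges and look them up, instead of testing every edge-triangle pair
--     for j in range(len(triangles)):
--         t = triangles[j]
--         for key in ((t[0], t[1]), (t[0], t[2]), (t[1], t[2])):
--             for i in index_of.get(key, ()):
--                 G[i][j + nE] = 1
--                 G[j + nE][i] = 1
--     return G
-- ===== Notes on version B (the rewrite author's own statement) =====
-- stated objective: faster
-- what changed: B indexes the edges once in a dict keyed by (e[0],e[1]) mapping to the list of indices of equal edges, then drives the fill from the triangles: each triangle generates its three sub-edge keys and looks them up, so the pairwise edge-by-triangle in_tuple scan disappears.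
import Mathlib
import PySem

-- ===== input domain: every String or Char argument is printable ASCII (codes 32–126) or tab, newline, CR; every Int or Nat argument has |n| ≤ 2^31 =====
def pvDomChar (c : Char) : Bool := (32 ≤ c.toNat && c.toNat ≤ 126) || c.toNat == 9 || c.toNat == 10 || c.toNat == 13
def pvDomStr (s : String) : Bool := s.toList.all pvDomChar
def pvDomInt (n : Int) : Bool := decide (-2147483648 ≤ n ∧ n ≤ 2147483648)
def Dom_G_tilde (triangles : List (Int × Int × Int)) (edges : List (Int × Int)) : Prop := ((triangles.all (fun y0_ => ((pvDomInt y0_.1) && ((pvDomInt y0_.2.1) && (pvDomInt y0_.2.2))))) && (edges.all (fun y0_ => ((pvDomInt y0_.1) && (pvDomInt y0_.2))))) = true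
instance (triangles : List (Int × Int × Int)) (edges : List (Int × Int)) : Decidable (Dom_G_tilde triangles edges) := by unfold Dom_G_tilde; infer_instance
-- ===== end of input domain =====

-- B indexes the edges once in a dict keyed by (e[0],e[1]) (key -> list of edge indices) and
-- fills the matrix driven by each triangle's three generated sub-edge keys, removing A's
-- pairwise in_tuple scan; objective: faster (fewer predicate evaluations). A is total.

-- ===== PORT A =====
-- helper of A
def in_tuple (t1 : Int × Int) (t2 : Int × Int × Int) : Bool :=
  (t1.1 == t2.1 && (t1.2 == t2.2.1 || t1.2 == t2.2.2)) || (t1.1 == t2.2.1 && t1.2 == t2.2.2)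

-- 'G[r][c] = v' on a list-of-lists matrix (both programs only write in-range indices)
def setMat (M : List (List Int)) (r c : Nat) (v : Int) : List (List Int) :=
  M.set r ((M.getD r []).set c v)

def G_tilde (triangles : List (Int × Int × Int)) (edges : List (Int × Int)) : List (List Int) :=
  let nE := edges.length
  let n_tilde := triangles.length + nE
  let G0 := (List.range n_tilde).map (fun _ => (List.range n_tilde).map (fun _ => (0 : Int)))
  (List.range edges.length).foldl
    (fun G i_edge =>
      (List.range triangles.length).foldl
        (fun G i_triangle =>
          let e_i := edges.getD i_edge (0, 0)
          let t_i := triangles.getD i_triangle (0, 0, 0)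
          if in_tuple e_i t_i then
            setMat (setMat G i_edge (i_triangle + nE) 1) (i_triangle + nE) i_edge 1
          else G)
        G)
    G0

-- ===== PORT B =====
-- 'index_of.setdefault((edges[i][0], edges[i][1]), []).append(i)' over all i
def buildIdx (edges : List (Int × Int)) : PySem.Dict (Int × Int) (List Nat) :=
  (List.range edges.length).foldl
    (fun d i =>
      let e := edges.getD i (0, 0)
      d.modify (e.1, e.2) [] (· ++ [i]))
    PySem.Dict.empty

def G_tilde_alt (triangles : List (Int × Int × Int)) (edges : List (Int × Int)) : List (List Int) :=
  let nE := edges.length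
  let n_tilde := triangles.length + nE
  let G0 := (List.range n_tilde).map (fun _ => (List.range n_tilde).map (fun _ => (0 : Int)))
  let idx := buildIdx edges
  (List.range triangles.length).foldl
    (fun G j =>
      let t := triangles.getD j (0, 0, 0)
      [(t.1, t.2.1), (t.1, t.2.2), (t.2.1, t.2.2)].foldl
        (fun G key =>
          (idx.getD key []).foldl
            (fun G i => setMat (setMat G i (j + nE) 1) (j + nE) i 1)
            G)
        G)
    G0

-- ===== PRECONDITION & SPEC =====
def Spec_G_tilde (triangles : List (Int × Int × Int)) (edges : List (Int × Int)) (out : List (List Int)) : Prop := out = G_tilde_alt triangles edges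
instance (triangles : List (Int × Int × Int)) (edges : List (Int × Int)) (out : List (List Int)) : Decidable (Spec_G_tilde triangles edges out) := by unfold Spec_G_tilde; infer_instance

-- ===== CLAIM (what is proved, stated in full; the proofs are below) =====
def Claim_equal_G_tilde : Prop := ∀ (triangles : List (Int × Int × Int)) (edges : List (Int × Int)), Dom_G_tilde triangles edges → Spec_G_tilde triangles edges (G_tilde triangles edges)

-- ===== LEMMAS AND PROOFS =====
def getE (M : List (List Int)) (r c : Nat) : Int := (M.getD r []).getD c 0

theorem length_setMat (M : List (List Int)) (r c : Nat) (v : Int) :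
    (setMat M r c v).length = M.length := by simp [setMat]

theorem rowlen_setMat (M : List (List Int)) (r c : Nat) (v : Int) (r' : Nat) :
    ((setMat M r c v).getD r' []).length = ((M.getD r' []).length) := by
  simp only [setMat, List.getD, List.getElem?_set]
  by_cases h : r = r'
  · subst h
    by_cases hr : r < M.length <;> simp [hr]
  · simp [h]

theorem getE_setMat (M : List (List Int)) (r c : Nat) (v : Int) (r' c' : Nat)
    (hr : r < M.length) (hc : c < (M.getD r []).length) :
    getE (setMat M r c v) r' c' = if r' = r ∧ c' = c then v else getE M r' c' := by
  have hc' : c < M[r].length := by rwa [List.getD_eq_getElem _ _ hr] at hc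
  simp only [getE, setMat, List.getD, List.getElem?_set]
  by_cases h : r' = r
  · subst h
    simp only [hr, if_pos]
    by_cases h2 : c' = c
    · simp [h2, List.getElem?_eq_getElem hr, hc']
    · have h2' : ¬ c = c' := fun hh => h2 hh.symm
      simp [h2, h2']
  · have h' : ¬ r = r' := fun hh => h hh.symm
    simp [h, h']

def ShapeN (n : Nat) (M : List (List Int)) : Prop :=
  M.length = n ∧ ∀ r, r < n → (M.getD r []).length = n

theorem shapeN_setMat {n : Nat} {M : List (List Int)} (h : ShapeN n M) (r c : Nat) (v : Int) :
    ShapeN n (setMat M r c v) := by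
  exact ⟨by rw [length_setMat, h.1], fun r' hr' => by rw [rowlen_setMat]; exact h.2 r' hr'⟩

-- the cells touched by one symmetric pair of writes (as a Bool so folds stay decidable-free)
def posB (nE r c i j : Nat) : Bool := ((r == i) && (c == j + nE)) || ((r == j + nE) && (c == i))

-- the symmetric pair of writes both programs perform
def pairWrite (nE j : Nat) (G : List (List Int)) (i : Nat) : List (List Int) :=
  setMat (setMat G i (j + nE) 1) (j + nE) i 1

theorem pairWrite_char {n : Nat} (nE i j : Nat) (hi : i < nE) (hjn : j + nE < n)
    (M : List (List Int)) (hM : ShapeN n M) :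
    ShapeN n (pairWrite nE j M i) ∧
    ∀ r c, getE (pairWrite nE j M i) r c =
      if posB nE r c i j then 1 else getE M r c := by
  have hin : i < n := by omega
  have h1 : ShapeN n (setMat M i (j + nE) 1) := shapeN_setMat hM _ _ _
  refine ⟨shapeN_setMat h1 _ _ _, fun r c => ?_⟩
  unfold pairWrite
  rw [getE_setMat _ _ _ _ _ _ (by rw [h1.1]; omega) (by rw [h1.2 (j + nE) hjn]; omega),
      getE_setMat _ _ _ _ _ _ (by rw [hM.1]; omega) (by rw [hM.2 i hin]; omega)]
  simp only [posB, Bool.or_eq_true, Bool.and_eq_true, beq_iff_eq]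
  split_ifs <;> tauto

-- generic characterisation of a fold of shape-preserving idempotent 0/1 writes
theorem foldl_write_char {α : Type} {n : Nat} (f : List (List Int) → α → List (List Int))
    (P : α → Nat → Nat → Bool) :
    ∀ (l : List α) (M : List (List Int)),
    (∀ a ∈ l, ∀ M, ShapeN n M → ShapeN n (f M a) ∧
        ∀ r c, getE (f M a) r c = if P a r c then 1 else getE M r c) →
    ShapeN n M →
    ShapeN n (l.foldl f M) ∧
    ∀ r c, getE (l.foldl f M) r c = if l.any (fun a => P a r c) then 1 else getE M r c := by
  intro l
  induction l with
  | nil => intro M _ hM; exact ⟨hM, fun r c => by simp⟩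
  | cons a l ih =>
    intro M hstep hM
    obtain ⟨hsh, hent⟩ := hstep a (by simp) M hM
    obtain ⟨hsh', hent'⟩ := ih (f M a) (fun a' ha' => hstep a' (by simp [ha'])) hsh
    refine ⟨hsh', fun r c => ?_⟩
    rw [List.foldl_cons, hent' r c, hent r c, List.any_cons]
    by_cases hA : l.any (fun a => P a r c) = true
    · simp [hA]
    · by_cases hB : P a r c = true <;> simp [hA, hB]

def initG (n : Nat) : List (List Int) :=
  (List.range n).map (fun _ => (List.range n).map (fun _ => (0 : Int)))

theorem shape_initG (n : Nat) : ShapeN n (initG n) := by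
  refine ⟨by simp [initG], fun r hr => ?_⟩
  simp [initG, List.getD, hr]

theorem getE_initG (n r c : Nat) : getE (initG n) r c = 0 := by
  unfold getE initG List.getD
  simp only [List.getElem?_map]
  cases h : (List.range n)[r]? <;> simp only [Option.map_none, Option.map_some, Option.getD_none, Option.getD_some]
  · simp
  · simp only [List.getElem?_map]
    cases h2 : (List.range n)[c]? <;> simp

-- named step functions of A's fold (definitionally the lambdas in G_tilde)
def stepA (triangles : List (Int × Int × Int)) (edges : List (Int × Int)) (i : Nat)
    (G : List (List Int)) (j : Nat) : List (List Int) :=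
  if in_tuple (edges.getD i (0, 0)) (triangles.getD j (0, 0, 0)) then
    setMat (setMat G i (j + edges.length) 1) (j + edges.length) i 1
  else G

def rowStepA (triangles : List (Int × Int × Int)) (edges : List (Int × Int))
    (G : List (List Int)) (i : Nat) : List (List Int) :=
  (List.range triangles.length).foldl (stepA triangles edges i) G

theorem G_tilde_eq (triangles : List (Int × Int × Int)) (edges : List (Int × Int)) :
    G_tilde triangles edges =
      (List.range edges.length).foldl (rowStepA triangles edges)
        (initG (triangles.length + edges.length)) := rfl

def hitA (triangles : List (Int × Int × Int)) (edges : List (Int × Int)) (i j : Nat) : Bool :=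
  in_tuple (edges.getD i (0, 0)) (triangles.getD j (0, 0, 0))

theorem stepA_char (triangles : List (Int × Int × Int)) (edges : List (Int × Int))
    (i j : Nat) (M : List (List Int)) (hi : i < edges.length) (hj : j < triangles.length)
    (hM : ShapeN (triangles.length + edges.length) M) :
    ShapeN (triangles.length + edges.length) (stepA triangles edges i M j) ∧
    ∀ r c, getE (stepA triangles edges i M j) r c =
      if hitA triangles edges i j && posB edges.length r c i j then 1 else getE M r c := by
  unfold stepA
  by_cases hhit : in_tuple (edges.getD i (0, 0)) (triangles.getD j (0, 0, 0)) = true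
  · rw [if_pos hhit]
    obtain ⟨hsh2, hent2⟩ := pairWrite_char (n := triangles.length + edges.length)
      edges.length i j hi (by omega) M hM
    refine ⟨hsh2, fun r c => ?_⟩
    rw [show (setMat (setMat M i (j + edges.length) 1) (j + edges.length) i 1) =
        pairWrite edges.length j M i from rfl, hent2 r c]
    have : hitA triangles edges i j = true := hhit
    rw [this, Bool.true_and]
  · rw [if_neg hhit]
    refine ⟨hM, fun r c => ?_⟩
    have : hitA triangles edges i j = false := by
      unfold hitA; exact Bool.not_eq_true _ ▸ Bool.of_not_eq_true hhit
    rw [this, Bool.false_and, if_neg (by simp)]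

-- entry characterisation of A's matrix
theorem A_char (triangles : List (Int × Int × Int)) (edges : List (Int × Int)) :
    ShapeN (triangles.length + edges.length) (G_tilde triangles edges) ∧
    ∀ r c, getE (G_tilde triangles edges) r c =
      if (List.range edges.length).any (fun i =>
          (List.range triangles.length).any (fun j =>
            hitA triangles edges i j && posB edges.length r c i j)) then 1 else 0 := by
  have h := foldl_write_char (n := triangles.length + edges.length)
    (rowStepA triangles edges)
    (fun i r c => (List.range triangles.length).any (fun j =>
        hitA triangles edges i j && posB edges.length r c i j))
    (List.range edges.length) (initG (triangles.length + edges.length))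
    (by
      intro i hi M hM
      have hi' : i < edges.length := List.mem_range.mp hi
      exact foldl_write_char (stepA triangles edges i)
        (fun j r c => hitA triangles edges i j && posB edges.length r c i j)
        (List.range triangles.length) M
        (fun j hj M hM => stepA_char triangles edges i j M hi' (List.mem_range.mp hj) hM)
        hM)
    (shape_initG _)
  obtain ⟨hsh, hent⟩ := h
  rw [← G_tilde_eq] at hsh hent
  exact ⟨hsh, fun r c => by rw [hent r c, getE_initG]⟩

-- named step functions of B's fold (definitionally the lambdas in G_tilde_alt)
def keys3 (t : Int × Int × Int) : List (Int × Int) :=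
  [(t.1, t.2.1), (t.1, t.2.2), (t.2.1, t.2.2)]

def keyStepB (edges : List (Int × Int)) (j : Nat)
    (G : List (List Int)) (key : Int × Int) : List (List Int) :=
  ((buildIdx edges).getD key []).foldl (pairWrite edges.length j) G

def triStepB (triangles : List (Int × Int × Int)) (edges : List (Int × Int))
    (G : List (List Int)) (j : Nat) : List (List Int) :=
  (keys3 (triangles.getD j (0, 0, 0))).foldl (keyStepB edges j) G

theorem G_tilde_alt_eq (triangles : List (Int × Int × Int)) (edges : List (Int × Int)) :
    G_tilde_alt triangles edges =
      (List.range triangles.length).foldl (triStepB triangles edges)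
        (initG (triangles.length + edges.length)) := rfl

-- the indices stored under a key in B's dict
theorem mem_buildIdx_getD (edges : List (Int × Int)) (k : Int × Int) (i : Nat) :
    i ∈ (buildIdx edges).getD k [] ↔
      i < edges.length ∧ ((edges.getD i (0, 0)).1, (edges.getD i (0, 0)).2) = k := by
  have hfold : buildIdx edges =
      ((List.range edges.length).map
        (fun i => (((edges.getD i (0, 0)).1, (edges.getD i (0, 0)).2), i))).foldl
        (fun d p => d.modify p.1 [] (· ++ [p.2])) PySem.Dict.empty := by
    rw [List.foldl_map]
    rfl
  rw [hfold, PySem.Dict.getD_foldl_modify_append, PySem.Dict.getD_empty]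
  simp only [List.nil_append, List.mem_map, List.mem_filter, List.mem_range]
  constructor
  · rintro ⟨p, ⟨⟨i', hi', rfl⟩, hk⟩, rfl⟩
    exact ⟨hi', by simpa using hk⟩
  · rintro ⟨hi, hk⟩
    exact ⟨_, ⟨⟨i, hi, rfl⟩, by simpa using hk⟩, rfl⟩

-- entry characterisation of B's matrix
theorem B_char (triangles : List (Int × Int × Int)) (edges : List (Int × Int)) :
    ShapeN (triangles.length + edges.length) (G_tilde_alt triangles edges) ∧
    ∀ r c, getE (G_tilde_alt triangles edges) r c =
      if (List.range triangles.length).any (fun j =>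
          (keys3 (triangles.getD j (0, 0, 0))).any (fun key =>
            ((buildIdx edges).getD key []).any (fun i =>
              posB edges.length r c i j))) then 1 else 0 := by
  have h := foldl_write_char (n := triangles.length + edges.length)
    (triStepB triangles edges)
    (fun j r c => (keys3 (triangles.getD j (0, 0, 0))).any (fun key =>
        ((buildIdx edges).getD key []).any (fun i => posB edges.length r c i j)))
    (List.range triangles.length) (initG (triangles.length + edges.length))
    (by
      intro j hj M hM
      have hj' : j < triangles.length := List.mem_range.mp hj
      exact foldl_write_char (keyStepB edges j)
        (fun key r c => ((buildIdx edges).getD key []).any (fun i => posB edges.length r c i j))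
        (keys3 (triangles.getD j (0, 0, 0))) M
        (by
          intro key _ M hM
          exact foldl_write_char (pairWrite edges.length j)
            (fun i r c => posB edges.length r c i j)
            ((buildIdx edges).getD key []) M
            (by
              intro i hi M hM
              have hi' : i < edges.length := ((mem_buildIdx_getD edges key i).mp hi).1
              exact pairWrite_char edges.length i j hi' (by omega) M hM)
            hM)
        hM)
    (shape_initG _)
  obtain ⟨hsh, hent⟩ := h
  rw [← G_tilde_alt_eq] at hsh hent
  exact ⟨hsh, fun r c => by rw [hent r c, getE_initG]⟩

theorem in_tuple_iff_mem_keys (e : Int × Int) (t : Int × Int × Int) :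
    in_tuple e t = true ↔ (e.1, e.2) ∈ keys3 t := by
  simp only [in_tuple, keys3, Bool.or_eq_true, Bool.and_eq_true, beq_iff_eq, List.mem_cons,
    Prod.mk.injEq, List.not_mem_nil, or_false]
  tauto

theorem mat_ext {n : Nat} {M N : List (List Int)} (hM : ShapeN n M) (hN : ShapeN n N)
    (h : ∀ r c, getE M r c = getE N r c) : M = N := by
  apply List.ext_getElem (by rw [hM.1, hN.1])
  intro r h1 h2
  have hr : r < n := by rwa [hM.1] at h1
  apply List.ext_getElem
  · rw [← List.getD_eq_getElem _ [] h1, ← List.getD_eq_getElem _ [] h2, hM.2 r hr, hN.2 r hr]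
  · intro c hca hcb
    have e1 : M[r][c] = getE M r c := by
      unfold getE; rw [List.getD_eq_getElem _ _ h1, List.getD_eq_getElem _ _ hca]
    have e2 : N[r][c] = getE N r c := by
      unfold getE; rw [List.getD_eq_getElem _ _ h2, List.getD_eq_getElem _ _ hcb]
    rw [e1, e2, h r c]

theorem final (triangles : List (Int × Int × Int)) (edges : List (Int × Int)) :
    G_tilde triangles edges = G_tilde_alt triangles edges := by
  obtain ⟨hshA, hentA⟩ := A_char triangles edges
  obtain ⟨hshB, hentB⟩ := B_char triangles edges
  refine mat_ext hshA hshB (fun r c => ?_)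
  rw [hentA r c, hentB r c]
  refine if_congr ?_ rfl rfl
  simp only [List.any_eq_true, List.mem_range, Bool.and_eq_true]
  constructor
  · rintro ⟨i, hi, j, hj, hhit, hpos⟩
    refine ⟨j, hj, ((edges.getD i (0, 0)).1, (edges.getD i (0, 0)).2), ?_, i, ?_, hpos⟩
    · exact (in_tuple_iff_mem_keys _ _).mp hhit
    · exact (mem_buildIdx_getD edges _ i).mpr ⟨hi, rfl⟩
  · rintro ⟨j, hj, key, hkey, i, hidx, hpos⟩
    obtain ⟨hi, hk⟩ := (mem_buildIdx_getD edges key i).mp hidx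
    refine ⟨i, hi, j, hj, ?_, hpos⟩
    exact (in_tuple_iff_mem_keys _ _).mpr (hk ▸ hkey)

-- ===== VERDICT (by name: the statement is the Claim_ definition above) =====
theorem G_tilde_spec : Claim_equal_G_tilde := by
  intro triangles edges _
  exact final triangles edges
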